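-- pv_equiv track=rewrite | github.com/wawzysys/Algorithm | 2024bishi/1_2024秋招/20250811拼多多/2_1.py | process_jobs
-- ===== SOURCE A (Python) =====
-- import heapq
--
-- def process_jobs(jobs):
--     # 初始化最小堆和变量
--     min_heap = []
--     cur = 0  # 当前时间
--     tol = 0  # 总完成耗时
--
--     # 处理每个作业
--     for ti, wi in sorted(jobs, key=lambda x: x[0]):
--         # 如果当前时间小于作业布置时间，更新当前时间
--         if cur < ti:
--             cur = ti
--
--         # 将作业添加到最小堆
--         heapq.heappush(min_heap, (wi, ti))
--
--         # 处理可完成的作业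
--         while min_heap and cur >= ti:
--             # 从堆中取出完成时间最短的作业
--             w, t = heapq.heappop(min_heap)
--             cur += w  # 更新当前时间为作业完成时间
--             tol += cur - t  # 更新总完成耗时
--
--     # 处理剩余的作业
--     while min_heap:
--         w, t = heapq.heappop(min_heap)
--         cur += w
--         tol += cur - t
--
--     return tol
-- ===== SOURCE B (Python) =====
-- def process_jobs(jobs):
--     # Prefix-sum formulation: completion of the i-th job (sorted by ti) is
--     # max_{j<=i}(max(0, t_j - pref[j-1])) + pref[i], where pref is the running
--     # sum of work; total cost is the sum of completion - t_i.  No simulated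
--     # clock, no heap: three staged passes over the sorted list.
--     order = sorted(jobs, key=lambda x: x[0])
--     pref = [0]
--     for _, w in order:
--         pref.append(pref[-1] + w)
--     starts = []
--     best = 0
--     for (t, _), p in zip(order, pref):
--         best = max(best, t - p)
--         starts.append(best)
--     tol = 0
--     for (t, _), s, p in zip(order, starts, pref[1:]):
--         tol += s + p - t
--     return tol
-- ===== Notes on version B (the rewrite author's own statement) =====
-- stated objective: alternative
-- what changed: Replaced the heap-and-clock simulation with an arithmetic prefix-sum formulation: three staged passes (prefix sums of work, running max of t_i - pref[i-1], then a sum of start+pref-t), using the identity completion_i = max_j(max(0,t_j - pref[j-1])) + pref[i]; no simulated current time and no priority queue.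
import Mathlib
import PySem

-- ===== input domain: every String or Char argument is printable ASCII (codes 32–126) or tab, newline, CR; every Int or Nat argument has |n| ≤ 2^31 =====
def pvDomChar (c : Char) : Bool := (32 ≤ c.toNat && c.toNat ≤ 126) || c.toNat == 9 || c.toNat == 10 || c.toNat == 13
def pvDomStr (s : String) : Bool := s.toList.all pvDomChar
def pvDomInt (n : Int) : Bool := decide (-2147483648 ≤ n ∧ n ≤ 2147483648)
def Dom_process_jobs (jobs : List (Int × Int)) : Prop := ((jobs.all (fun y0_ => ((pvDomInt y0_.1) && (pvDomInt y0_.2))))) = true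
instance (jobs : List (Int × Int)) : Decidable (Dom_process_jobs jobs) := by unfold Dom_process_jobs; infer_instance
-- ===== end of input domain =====

-- B replaces A's heap-and-clock simulation by a prefix-sum identity (completion_i = running max of (t_j - pref[j-1], floored at 0) plus pref[i]), computed in three staged passes; an alternative algorithm, same result.


-- ===== PORT A =====
-- heapq model: the heap as a lex-sorted list; heappush = ordered insert, heappop = head.
-- (Exact: heapq pops the lexicographically smallest (w, t) tuple each time.)
def pvHeapPush (h : List (Int × Int)) (x : Int × Int) : List (Int × Int) :=
  match h with
  | [] => [x]
  | y :: t =>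
      if x.1 < y.1 ∨ (x.1 = y.1 ∧ x.2 ≤ y.2) then x :: y :: t else y :: pvHeapPush t x

-- inner 'while min_heap and cur >= ti' loop (each pop shrinks the heap)
def pvDrain1 (h : List (Int × Int)) (ti cur tol : Int) : List (Int × Int) × Int × Int :=
  match h with
  | [] => ([], cur, tol)
  | (w, t) :: rest =>
      if ti ≤ cur then pvDrain1 rest ti (cur + w) (tol + ((cur + w) - t))
      else ((w, t) :: rest, cur, tol)

-- trailing 'while min_heap' loop
def pvDrain2 (h : List (Int × Int)) (cur tol : Int) : Int :=
  match h with
  | [] => tol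
  | (w, t) :: rest => pvDrain2 rest (cur + w) (tol + ((cur + w) - t))

-- main 'for ti, wi in sorted(jobs, key=lambda x: x[0])' loop
def pvLoopA (l : List (Int × Int)) (h : List (Int × Int)) (cur tol : Int) : Int :=
  match l with
  | [] => pvDrain2 h cur tol
  | (ti, wi) :: rest =>
      let cur1 := if cur < ti then ti else cur
      let h1 := pvHeapPush h (wi, ti)
      let r := pvDrain1 h1 ti cur1 tol
      pvLoopA rest r.1 r.2.1 r.2.2

def process_jobs (jobs : List (Int × Int)) : Int :=
  pvLoopA (PySem.List.sorted jobs (fun x => x.1) false) [] 0 0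

-- ===== PORT B =====
-- pref = [0]; for _, w in order: pref.append(pref[-1] + w)
def pvPrefB (ws : List Int) (acc : Int) : List Int :=
  match ws with
  | [] => [acc]
  | w :: rest => acc :: pvPrefB rest (acc + w)

-- for (t, _), p in zip(order, pref): best = max(best, t - p); starts.append(best)
def pvStartsB (order : List (Int × Int)) (pref : List Int) (best : Int) : List Int :=
  match order, pref with
  | (t, _) :: os, p :: ps =>
      let b := max best (t - p)
      b :: pvStartsB os ps b
  | _, _ => []

-- for (t, _), s, p in zip(order, starts, pref[1:]): tol += s + p - t
def pvSumB (order : List (Int × Int)) (starts pref1 : List Int) (tol : Int) : Int :=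
  match order, starts, pref1 with
  | (t, _) :: os, s :: ss, p :: ps => pvSumB os ss ps (tol + (s + p - t))
  | _, _, _ => tol

def process_jobs_alt (jobs : List (Int × Int)) : Int :=
  let order := PySem.List.sorted jobs (fun x => x.1) false
  let pref := pvPrefB (order.map (fun x => x.2)) 0
  let starts := pvStartsB order pref 0
  pvSumB order starts pref.tail 0

-- ===== PRECONDITION & SPEC =====
def Spec_process_jobs (jobs : List (Int × Int)) (out : Int) : Prop := out = process_jobs_alt jobs
instance (jobs : List (Int × Int)) (out : Int) : Decidable (Spec_process_jobs jobs out) := by unfold Spec_process_jobs; infer_instance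

-- ===== CLAIM =====
def Claim_equal_process_jobs : Prop := ∀ (jobs : List (Int × Int)), Dom_process_jobs jobs → Spec_process_jobs jobs (process_jobs jobs)

-- ===== LEMMAS AND PROOFS =====
-- Reference clock fold: cur' = max(cur, t) + w; tol' = tol + cur' - t.
def pvClockStep (st : Int × Int) (p : Int × Int) : Int × Int :=
  let c := (if st.1 < p.1 then p.1 else st.1) + p.2
  (c, st.2 + (c - p.1))

-- In A the heap is empty at every iteration boundary of the main loop (the
-- just-pushed job is always drained immediately since cur ≥ ti after the reset),
-- so A's loop is exactly the clock fold.
theorem pvLoopA_eq_foldl (l : List (Int × Int)) (cur tol : Int) :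
    pvLoopA l [] cur tol = (l.foldl pvClockStep (cur, tol)).2 := by
  induction l generalizing cur tol with
  | nil => simp [pvLoopA, pvDrain2]
  | cons hd rest ih =>
      obtain ⟨ti, wi⟩ := hd
      have hle : ti ≤ (if cur < ti then ti else cur) := by split <;> omega
      simp only [pvLoopA, pvHeapPush, pvDrain1, List.foldl, if_pos hle, ih, pvClockStep]

-- B's staged passes compute the clock fold: with cur = best + prefAcc, each step
-- preserves max best (t - p) + (p + w) = max (best + p) t + w = cur'.
theorem pvStaged_eq_foldl (l : List (Int × Int)) (b0 p0 tol : Int) :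
    pvSumB l (pvStartsB l (pvPrefB (l.map (fun x => x.2)) p0) b0)
      (pvPrefB (l.map (fun x => x.2)) p0).tail tol
    = (l.foldl pvClockStep (b0 + p0, tol)).2 := by
  induction l generalizing b0 p0 tol with
  | nil => simp [pvSumB]
  | cons hd rest ih =>
      obtain ⟨t, w⟩ := hd
      have hcur : max b0 (t - p0) + (p0 + w)
          = (if b0 + p0 < t then t else b0 + p0) + w := by
        rcases max_cases b0 (t - p0) with ⟨h1, h2⟩ | ⟨h1, h2⟩ <;> rw [h1] <;>
          split <;> omega
      cases hws : rest.map (fun x => x.2) with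
      | nil =>
          have : rest = [] := by
            cases rest with | nil => rfl | cons a b => simp at hws
          subst this
          simp only [List.map, pvPrefB, pvStartsB, pvSumB, List.tail, List.foldl,
            pvClockStep]
          omega
      | cons w2 ws2 =>
          simp only [List.map, pvPrefB, hws, pvStartsB, List.tail, pvSumB, List.foldl]
          have := ih (max b0 (t - p0)) (p0 + w) (tol + (max b0 (t - p0) + (p0 + w) - t))
          rw [hws] at this
          simp only [pvPrefB, List.tail] at this
          rw [this, hcur, pvClockStep]

-- ===== VERDICT =====
theorem process_jobs_spec : Claim_equal_process_jobs := by
  intro jobs _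
  unfold Spec_process_jobs process_jobs process_jobs_alt
  rw [pvLoopA_eq_foldl, pvStaged_eq_foldl]
  norm_num
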